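-- pv_equiv track=rewrite | github.com/Ristafan/BullingerDigital | src/GLiNER/ResultComparer.py | count_exact_mismatches
-- ===== SOURCE A (Python) =====
-- def count_exact_mismatches(predicted_entities, label_entities):
--     """Count mismatches with exact token position matching."""
--     total_mismatch = len(label_entities) - len(predicted_entities)
--
--     predicted_persons = [e for e in predicted_entities if e[2].lower() == "person"]
--     label_persons = [e for e in label_entities if e[2].lower() == "person"]
--     person_mismatch = len(label_persons) - len(predicted_persons)
--
--     predicted_locations = [e for e in predicted_entities if e[2].lower() == "location"]
--     label_locations = [e for e in label_entities if e[2].lower() == "location"]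
--     location_mismatch = len(label_locations) - len(predicted_locations)
--
--     return {
--         'total': total_mismatch,
--         'person': person_mismatch,
--         'location': location_mismatch
--     }
-- ===== SOURCE B (Python) =====
-- def count_exact_mismatches(predicted_entities, label_entities):
--     """Count mismatches via a category frequency table (dict keyed by lowercased type)."""
--     counts = {}
--     for e in label_entities:
--         t = e[2].lower()
--         counts[t] = counts.get(t, 0) + 1
--     for e in predicted_entities:
--         t = e[2].lower()
--         counts[t] = counts.get(t, 0) - 1
--     return {'total': len(label_entities) - len(predicted_entities),
--             'person': counts.get('person', 0),
--             'location': counts.get('location', 0)}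
-- ===== Notes on version B (the rewrite author's own statement) =====
-- stated objective: alternative
-- what changed: Replaces the six hard-coded filtering comprehensions with a single frequency table (a dict keyed by every lowercased entity type, incremented over labels and decremented over predictions) from which the person/location differences are read off by lookup.
import Mathlib
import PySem

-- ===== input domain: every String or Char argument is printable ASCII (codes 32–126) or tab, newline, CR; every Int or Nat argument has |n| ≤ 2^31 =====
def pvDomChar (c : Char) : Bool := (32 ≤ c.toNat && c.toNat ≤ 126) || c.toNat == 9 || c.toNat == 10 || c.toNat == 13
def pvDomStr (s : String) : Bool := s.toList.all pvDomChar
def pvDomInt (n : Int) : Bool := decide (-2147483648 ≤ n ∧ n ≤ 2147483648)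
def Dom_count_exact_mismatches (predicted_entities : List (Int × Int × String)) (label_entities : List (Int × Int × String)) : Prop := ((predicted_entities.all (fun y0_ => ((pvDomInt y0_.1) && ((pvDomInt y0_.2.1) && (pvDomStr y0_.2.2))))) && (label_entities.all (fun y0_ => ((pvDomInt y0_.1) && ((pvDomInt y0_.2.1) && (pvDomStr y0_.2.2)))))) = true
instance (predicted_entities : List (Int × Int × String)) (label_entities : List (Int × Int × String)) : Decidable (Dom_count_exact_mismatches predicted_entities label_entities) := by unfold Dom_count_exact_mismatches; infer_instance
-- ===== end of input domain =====

-- B replaces the six hard-coded filtering comprehensions with one frequency table (a dict keyed by lowercased entity type, +1 per label, -1 per prediction) read off by lookup (alternative decomposition, same cost).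


-- ===== PORT A =====
def count_exact_mismatches (predicted_entities : List (Int × Int × String)) (label_entities : List (Int × Int × String)) : List (String × Int) :=
  let total_mismatch : Int := (label_entities.length : Int) - (predicted_entities.length : Int)
  let predicted_persons := predicted_entities.filter (fun e => PySem.Str.lower e.2.2 == "person")
  let label_persons := label_entities.filter (fun e => PySem.Str.lower e.2.2 == "person")
  let person_mismatch : Int := (label_persons.length : Int) - (predicted_persons.length : Int)
  let predicted_locations := predicted_entities.filter (fun e => PySem.Str.lower e.2.2 == "location")
  let label_locations := label_entities.filter (fun e => PySem.Str.lower e.2.2 == "location")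
  let location_mismatch : Int := (label_locations.length : Int) - (predicted_locations.length : Int)
  [("total", total_mismatch), ("person", person_mismatch), ("location", location_mismatch)]

-- ===== PORT B =====
-- one frequency-table step: counts[t] = counts.get(t, 0) + sign, t the lowercased entity type
def cemTally (sign : Int) (counts : PySem.Dict String Int) (e : Int × Int × String) : PySem.Dict String Int :=
  let t := PySem.Str.lower e.2.2
  counts.insert t (counts.getD t 0 + sign)

-- B: build one frequency table over all categories, then read person/location off by lookup
def count_exact_mismatches_alt (predicted_entities : List (Int × Int × String)) (label_entities : List (Int × Int × String)) : List (String × Int) :=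
  let counts := predicted_entities.foldl (cemTally (-1)) (label_entities.foldl (cemTally 1) PySem.Dict.empty)
  [("total", (label_entities.length : Int) - (predicted_entities.length : Int)),
   ("person", counts.getD "person" 0),
   ("location", counts.getD "location" 0)]

-- ===== PRECONDITION & SPEC =====
def Spec_count_exact_mismatches (predicted_entities : List (Int × Int × String)) (label_entities : List (Int × Int × String)) (out : List (String × Int)) : Prop := out = count_exact_mismatches_alt predicted_entities label_entities
instance (predicted_entities : List (Int × Int × String)) (label_entities : List (Int × Int × String)) (out : List (String × Int)) : Decidable (Spec_count_exact_mismatches predicted_entities label_entities out) := by unfold Spec_count_exact_mismatches; infer_instance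

-- ===== CLAIM (what is proved, stated in full; the proofs are below) =====
def Claim_equal_count_exact_mismatches : Prop := ∀ (predicted_entities : List (Int × Int × String)) (label_entities : List (Int × Int × String)), Dom_count_exact_mismatches predicted_entities label_entities → Spec_count_exact_mismatches predicted_entities label_entities (count_exact_mismatches predicted_entities label_entities)

-- ===== LEMMAS AND PROOFS =====
-- invariant: a tallying pass adds sign·(number of entities of category k) to the table's entry at k
theorem cemTally_foldl (sign : Int) (xs : List (Int × Int × String)) (d : PySem.Dict String Int) (k : String) :
    (xs.foldl (cemTally sign) d).getD k 0 =
      d.getD k 0 + sign * (xs.filter (fun e => PySem.Str.lower e.2.2 == k)).length := by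
  induction xs generalizing d with
  | nil => simp
  | cons x xs ih =>
    simp only [List.foldl_cons, ih, List.filter_cons]
    by_cases h : (PySem.Str.lower x.2.2 == k) = true
    · have hk : PySem.Str.lower x.2.2 = k := by simpa using h
      simp [cemTally, PySem.Dict.getD_insert, hk]; ring
    · have hk : k ≠ PySem.Str.lower x.2.2 := by
        intro hkk; exact h (by simp [hkk])
      simp [cemTally, PySem.Dict.getD_insert, hk, h]

-- ===== VERDICT (by name: the statement is the Claim_ definition above) =====
theorem count_exact_mismatches_spec : Claim_equal_count_exact_mismatches := by
  intro p l _
  show count_exact_mismatches p l = count_exact_mismatches_alt p l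
  simp only [count_exact_mismatches, count_exact_mismatches_alt, cemTally_foldl]
  simp; constructor <;> ring
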